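-- pv_equiv track=rewrite | github.com/sla2yer/fruity_quantum_flyway_brain_simulator | src/flywire_wave/coupling_contract.py | _bundle_status
-- ===== SOURCE A (Python) =====
-- from collections.abc import Mapping, Sequence
--
-- ASSET_STATUS_READY = "ready"
--
-- ASSET_STATUS_MISSING = "missing"
--
-- ASSET_STATUS_SKIPPED = "skipped"
--
-- def _bundle_status(statuses: Sequence[str]) -> str:
--     normalized_statuses = [str(status) for status in statuses if str(status)]
--     if not normalized_statuses:
--         return ASSET_STATUS_MISSING
--     if all(status in {ASSET_STATUS_READY, ASSET_STATUS_SKIPPED} for status in normalized_statuses):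
--         return ASSET_STATUS_READY
--     if any(status == ASSET_STATUS_READY for status in normalized_statuses):
--         return "partial"
--     if all(status == ASSET_STATUS_SKIPPED for status in normalized_statuses):
--         return ASSET_STATUS_SKIPPED
--     if any(status == ASSET_STATUS_SKIPPED for status in normalized_statuses) and all(
--         status in {ASSET_STATUS_MISSING, ASSET_STATUS_SKIPPED} for status in normalized_statuses
--     ):
--         return ASSET_STATUS_MISSING
--     return ASSET_STATUS_MISSING
-- ===== SOURCE B (Python) =====
-- def _bundle_status(statuses):
--     n = 0
--     saw_ready = False
--     saw_other = False
--     for status in statuses: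
--         s = str(status)
--         if not s:
--             continue
--         n += 1
--         if s == "ready":
--             saw_ready = True
--         elif s != "skipped":
--             saw_other = True
--     if n == 0:
--         return "missing"
--     if not saw_other:
--         return "ready"
--     if saw_ready:
--         return "partial"
--     return "missing"
-- ===== Notes on version B (the rewrite author's own statement) =====
-- stated objective: simpler
-- what changed: Replaces the filtered-list build plus up to five separate all/any scans (two of them dead branches) with a single pass keeping a count and two flags, decided by a flat four-line table.
import Mathlib
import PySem

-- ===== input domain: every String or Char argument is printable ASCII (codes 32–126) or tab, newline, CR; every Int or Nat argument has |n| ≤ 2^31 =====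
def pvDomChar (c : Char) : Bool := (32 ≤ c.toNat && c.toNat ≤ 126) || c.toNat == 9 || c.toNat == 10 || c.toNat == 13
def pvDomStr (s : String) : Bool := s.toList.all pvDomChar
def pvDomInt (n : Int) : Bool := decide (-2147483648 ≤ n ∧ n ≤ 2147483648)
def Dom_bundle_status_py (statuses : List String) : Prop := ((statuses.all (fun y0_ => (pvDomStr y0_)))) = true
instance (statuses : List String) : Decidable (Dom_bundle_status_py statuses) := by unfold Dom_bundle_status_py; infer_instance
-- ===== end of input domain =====

-- B replaces A's filtered-list build and separate all/any scans with one single-pass fold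
-- keeping a count and two flags, decided by a flat table (objective: simpler).


-- ===== PORT A =====
-- str(status) on a str is the identity; 'if str(status)' keeps exactly the nonempty strings.
def bundle_status_py (statuses : List String) : String :=
  let normalized := statuses.filter (fun s => s ≠ "")
  if normalized = [] then "missing"
  else if normalized.all (fun s => s == "ready" || s == "skipped") then "ready"
  else if normalized.any (fun s => s == "ready") then "partial"
  else if normalized.all (fun s => s == "skipped") then "skipped"
  else if normalized.any (fun s => s == "skipped") &&
          normalized.all (fun s => s == "missing" || s == "skipped") then "missing"
  else "missing"

-- ===== PORT B =====
-- single pass: count of kept items, saw_ready, saw_other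
def bundle_status_py_alt (statuses : List String) : String :=
  let st := statuses.foldl
    (fun (acc : Nat × Bool × Bool) s =>
      if s = "" then acc
      else (acc.1 + 1,
            acc.2.1 || (s == "ready"),
            acc.2.2 || (s != "ready" && s != "skipped")))
    (0, false, false)
  if st.1 = 0 then "missing"
  else if !st.2.2 then "ready"
  else if st.2.1 then "partial"
  else "missing"

-- ===== PRECONDITION & SPEC =====
def Spec_bundle_status_py (statuses : List String) (out : String) : Prop := out = bundle_status_py_alt statuses
instance (statuses : List String) (out : String) : Decidable (Spec_bundle_status_py statuses out) := by unfold Spec_bundle_status_py; infer_instance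

-- ===== CLAIM (what is proved, stated in full; the proofs are below) =====
def Claim_equal_bundle_status_py : Prop := ∀ (statuses : List String), Dom_bundle_status_py statuses → Spec_bundle_status_py statuses (bundle_status_py statuses)

-- ===== LEMMAS AND PROOFS =====

-- The fold state in terms of the filtered list.
theorem pv_fold_char (statuses : List String) (n0 : Nat) (r0 o0 : Bool) :
    statuses.foldl
      (fun (acc : Nat × Bool × Bool) s =>
        if s = "" then acc
        else (acc.1 + 1,
              acc.2.1 || (s == "ready"),
              acc.2.2 || (s != "ready" && s != "skipped")))
      (n0, r0, o0)
    = (n0 + (statuses.filter (fun s => s ≠ "")).length,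
       r0 || (statuses.filter (fun s => s ≠ "")).any (fun s => s == "ready"),
       o0 || (statuses.filter (fun s => s ≠ "")).any (fun s => s != "ready" && s != "skipped")) := by
  induction statuses generalizing n0 r0 o0 with
  | nil => simp
  | cons h t ih =>
    by_cases hh : h = ""
    · simp [hh, List.foldl_cons, List.filter_cons, ih]
    · simp [hh, List.foldl_cons, List.filter_cons, ih, Bool.or_assoc, Nat.add_assoc,
        Nat.add_comm 1]

theorem pv_not_any_other (l : List String) :
    (l.any (fun s => s != "ready" && s != "skipped") = false)
      ↔ (l.all (fun s => s == "ready" || s == "skipped") = true) := by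
  induction l with
  | nil => simp
  | cons h t ih =>
    simp only [List.any_cons, List.all_cons, Bool.or_eq_false_iff, Bool.and_eq_true]
    constructor
    · rintro ⟨h1, h2⟩
      refine ⟨?_, ih.mp h2⟩
      rcases Bool.and_eq_false_iff.mp h1 with h3 | h3 <;> simp_all
    · rintro ⟨h1, h2⟩
      refine ⟨?_, ih.mpr h2⟩
      rcases (by simpa using h1 : h = "ready" ∨ h = "skipped") with h3 | h3 <;> simp_all

-- ===== VERDICT (by name: the statement is the Claim_ definition above) =====
theorem bundle_status_py_spec : Claim_equal_bundle_status_py := by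
  intro statuses _
  unfold Spec_bundle_status_py bundle_status_py bundle_status_py_alt
  rw [pv_fold_char]
  set f := statuses.filter (fun s => s ≠ "") with hf
  simp only [Nat.zero_add, Bool.false_or]
  by_cases hnil : f = []
  · simp [hnil]
  · have hlen : f.length ≠ 0 := by
      have := List.length_pos_iff.mpr hnil; omega
    simp only [hnil, if_neg hlen]
    by_cases hall : f.all (fun s => s == "ready" || s == "skipped") = true
    · have : f.any (fun s => s != "ready" && s != "skipped") = false :=
        (pv_not_any_other f).mpr hall
      simp [hall, this]
    · have hany : f.any (fun s => s != "ready" && s != "skipped") = true := by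
        by_contra hc
        exact hall ((pv_not_any_other f).mp (by simpa using hc))
      by_cases hr : f.any (fun s => s == "ready") = true
      · simp [hall, hany, hr]
      · have hsk : f.all (fun s => s == "skipped") = false := by
          by_contra hc
          apply hall
          simp only [List.all_eq_true] at *
          intro x hx
          have := (by simpa using hc : f.all (fun s => s == "skipped") = true)
          simp only [List.all_eq_true] at this
          simp [this x hx]
        simp [hall, hany, hr, hsk]
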